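-- pv_equiv track=rewrite | github.com/snimrod/lda_test1 | infra.py | convert_locations
-- ===== SOURCE A (Python) =====
-- def convert_locations(p_list):
--     size = len(p_list)
--     x = []
--     ti = 0
--     for n in p_list:
--         x.append([n, ti])
--         ti = ti + 1
--     x.sort()
--     loc = [0] * size
--
--     for tn in range(1, size):
--         if x[tn][0] == x[tn - 1][0]:
--             loc[x[tn][1]] = loc[x[tn - 1][1]]
--         else:
--             loc[x[tn][1]] = tn
--
--     return loc
-- ===== SOURCE B (Python) =====
-- import bisect
--
-- def convert_locations(p_list):
--     s = sorted(p_list)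
--     return [bisect.bisect_left(s, v) for v in p_list]
-- ===== Notes on version B (the rewrite author's own statement) =====
-- stated objective: simpler
-- what changed: Replaces A's index-paired sort plus scatter-assignment rank-propagation loop by sorting the values once and gathering each element's rank with a per-element binary search (bisect_left), since the first-occurrence rank equals the count of strictly smaller elements.
import Mathlib
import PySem

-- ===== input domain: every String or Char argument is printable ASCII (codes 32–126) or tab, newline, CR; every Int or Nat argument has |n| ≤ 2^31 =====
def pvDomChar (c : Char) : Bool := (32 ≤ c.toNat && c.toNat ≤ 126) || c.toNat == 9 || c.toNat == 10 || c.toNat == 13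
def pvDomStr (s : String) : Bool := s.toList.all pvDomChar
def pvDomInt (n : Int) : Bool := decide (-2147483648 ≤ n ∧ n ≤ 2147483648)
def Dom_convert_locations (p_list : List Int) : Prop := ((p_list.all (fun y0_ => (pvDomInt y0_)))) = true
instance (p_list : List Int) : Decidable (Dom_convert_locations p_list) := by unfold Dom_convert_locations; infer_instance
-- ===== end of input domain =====

-- B: sort the values once and gather each element's rank with a binary search (bisect_left),
-- replacing A's index-paired sort and scatter-assignment loop; objective: simpler.


-- ===== PORT A =====
-- Python's 'loc[i] = v'; exact for 0 ≤ i < len(xs), the only indices A produces (ti ≥ 0)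
def pySetItem (xs : List Int) (i : Int) (v : Int) : List Int := xs.set i.toNat v

def convert_locations (p_list : List Int) : List Int :=
  let size : Int := PySem.List.len p_list
  -- 'x = []; ti = 0; for n in p_list: x.append([n, ti]); ti += 1'
  let xt := p_list.foldl (fun (st : List (Int × Int) × Int) n => (st.1 ++ [(n, st.2)], st.2 + 1)) ([], 0)
  -- 'x.sort()' — lexicographic sort of the [value, index] pairs
  let x := PySem.List.sorted2 xt.1 (fun p => p.1) (fun p => p.2) false
  let loc : List Int := List.replicate size.toNat 0
  (PySem.List.pyRange 1 size 1).foldl (fun loc tn =>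
      if (PySem.List.pyGetD x tn ((0:Int), (0:Int))).1
           = (PySem.List.pyGetD x (tn - 1) ((0:Int), (0:Int))).1 then
        pySetItem loc (PySem.List.pyGetD x tn ((0:Int), (0:Int))).2
          (PySem.List.pyGetD loc (PySem.List.pyGetD x (tn - 1) ((0:Int), (0:Int))).2 0)
      else
        pySetItem loc (PySem.List.pyGetD x tn ((0:Int), (0:Int))).2 tn) loc

-- ===== PORT B =====
def convert_locations_alt (p_list : List Int) : List Int :=
  let s := PySem.List.sorted p_list (fun v => v) false
  p_list.map (fun v => ((PySem.List.bisectLeft s v : Nat) : Int))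

-- ===== PRECONDITION & SPEC =====
def Spec_convert_locations (p_list : List Int) (out : List Int) : Prop := out = convert_locations_alt p_list
instance (p_list : List Int) (out : List Int) : Decidable (Spec_convert_locations p_list out) := by unfold Spec_convert_locations; infer_instance

-- ===== CLAIM (what is proved, stated in full; the proofs are below) =====
def Claim_equal_convert_locations : Prop := ∀ (p_list : List Int), Dom_convert_locations p_list → Spec_convert_locations p_list (convert_locations p_list)

-- ===== LEMMAS AND PROOFS =====

-- the pair list A builds: [(v0,0),(v1,1),…]
def pairE : List Int → Int → List (Int × Int)
  | [], _ => []
  | v :: vs, t => (v, t) :: pairE vs (t + 1)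

-- the comparison sorted2 uses on (value, index) pairs (strict lexicographic)
def pLt (a b : Int × Int) : Bool :=
  decide (a.1 < b.1) || (!decide (b.1 < a.1) && decide (a.2 < b.2))

-- rank recurrence of A's second loop, read along the sorted list s
def rnk (s : List Int) : Nat → Nat
  | 0 => 0
  | t + 1 => if s.getD (t + 1) 0 = s.getD t 0 then rnk s t else t + 1

lemma foldl_build (xs : List Int) (acc : List (Int × Int)) (t : Int) :
    xs.foldl (fun (st : List (Int × Int) × Int) n => (st.1 ++ [(n, st.2)], st.2 + 1)) (acc, t)
      = (acc ++ pairE xs t, t + xs.length) := by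
  induction xs generalizing acc t with
  | nil => simp [pairE]
  | cons v vs ih => simp [pairE, ih, List.append_assoc]; ring

lemma length_pairE (xs : List Int) (t : Int) : (pairE xs t).length = xs.length := by
  induction xs generalizing t with
  | nil => simp [pairE]
  | cons v vs ih => simp [pairE, ih]

lemma map_fst_pairE (xs : List Int) (t : Int) : (pairE xs t).map (·.1) = xs := by
  induction xs generalizing t with
  | nil => simp [pairE]
  | cons v vs ih => simp [pairE, ih]

lemma map_snd_pairE (xs : List Int) (t : Int) :
    (pairE xs t).map (·.2) = PySem.List.pyRange t (t + xs.length) 1 := by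
  induction xs generalizing t with
  | nil => simp [pairE, PySem.List.pyRange_one_eq_nil]
  | cons v vs ih =>
      rw [PySem.List.pyRange_one_cons (by rw [List.length_cons]; push_cast; omega)]
      simp only [pairE, List.map_cons, ih, List.length_cons]
      congr 2
      push_cast; ring

lemma mem_pairE (xs : List Int) (t : Int) (p : Int × Int) (hp : p ∈ pairE xs t) :
    ∃ k : Nat, k < xs.length ∧ p = (xs.getD k 0, t + k) := by
  induction xs generalizing t with
  | nil => simp [pairE] at hp
  | cons v vs ih =>
      simp only [pairE, List.mem_cons] at hp
      rcases hp with h | h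
      · exact ⟨0, by simp, by simp [h]⟩
      · obtain ⟨k, hk, hkp⟩ := ih (t + 1) h
        refine ⟨k + 1, by simpa using hk, ?_⟩
        rw [hkp]
        simp only [List.getD_cons_succ, Prod.mk.injEq, true_and]
        push_cast; ring

lemma pLt_asymm {x y : Int × Int} (h : pLt x y = true) : pLt y x = false := by
  simp [pLt] at *; omega

lemma pLt_total_trans {x y z : Int × Int} (h1 : pLt x y = true) (h2 : pLt z y = false) :
    pLt z x = false := by
  simp [pLt] at *; omega

lemma insertBy_pairwise (x : Int × Int) (ys : List (Int × Int))
    (h : ys.Pairwise (fun a b => pLt b a = false)) :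
    (PySem.List.insertBy pLt x ys).Pairwise (fun a b => pLt b a = false) := by
  induction ys with
  | nil => simp [PySem.List.insertBy]
  | cons y ys ih =>
      rw [List.pairwise_cons] at h
      by_cases hxy : pLt x y = true
      · show (PySem.List.insertBy pLt x (y :: ys)).Pairwise _
        simp only [PySem.List.insertBy, hxy, if_pos]
        refine List.pairwise_cons.2 ⟨?_, List.pairwise_cons.2 ⟨h.1, h.2⟩⟩
        intro z hz
        rcases List.mem_cons.1 hz with rfl | hz'
        · exact pLt_asymm hxy
        · exact pLt_total_trans hxy (h.1 z hz')
      · show (PySem.List.insertBy pLt x (y :: ys)).Pairwise _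
        simp only [PySem.List.insertBy, hxy, if_neg, Bool.not_eq_true]
        refine List.pairwise_cons.2 ⟨?_, ih h.2⟩
        intro z hz
        rcases (PySem.List.mem_insertBy pLt x z ys).1 hz with rfl | hz'
        · exact Bool.eq_false_iff.2 hxy
        · exact h.1 z hz'

lemma sorted2_pairwise (xs : List (Int × Int)) :
    (PySem.List.sorted2 xs (fun p => p.1) (fun p => p.2) false).Pairwise
      (fun a b => pLt b a = false) := by
  show (xs.foldl (fun acc x => PySem.List.insertBy _ x acc) []).Pairwise _
  have : ∀ (l : List (Int × Int)) (acc : List (Int × Int)),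
      acc.Pairwise (fun a b => pLt b a = false) →
      (l.foldl (fun acc x => PySem.List.insertBy pLt x acc) acc).Pairwise
        (fun a b => pLt b a = false) := by
    intro l
    induction l with
    | nil => intro acc h; simpa using h
    | cons v vs ih => intro acc h; exact ih _ (insertBy_pairwise v acc h)
  exact this xs [] (by simp)

lemma rnk_le (s : List Int) (t : Nat) : rnk s t ≤ t := by
  induction t with
  | zero => simp [rnk]
  | succ t ih => simp only [rnk]; split <;> omega

lemma rnk_val (s : List Int) (t : Nat) : s.getD (rnk s t) 0 = s.getD t 0 := by
  induction t with
  | zero => simp [rnk]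
  | succ t ih => simp only [rnk]; split <;> simp_all

lemma rnk_pred (s : List Int) (t : Nat) (h : rnk s t ≠ 0) :
    s.getD (rnk s t - 1) 0 ≠ s.getD t 0 := by
  induction t with
  | zero => simp [rnk] at h
  | succ t ih =>
      by_cases heq : s.getD (t + 1) 0 = s.getD t 0
      · rw [show rnk s (t + 1) = rnk s t from by simp only [rnk, if_pos heq]] at h ⊢
        rw [heq]; exact ih h
      · rw [show rnk s (t + 1) = t + 1 from by simp only [rnk, if_neg heq]]
        simp only [Nat.add_sub_cancel]
        exact fun hh => heq hh.symm

lemma rnk_eq_bisect (s : List Int) (hs : s.Pairwise (· ≤ ·)) (t : Nat) (ht : t < s.length) :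
    rnk s t = PySem.List.bisectLeft s (s.getD t 0) := by
  obtain ⟨hle, hlt, hge⟩ := PySem.List.bisectLeft_spec s (s.getD t 0) hs
  set k := PySem.List.bisectLeft s (s.getD t 0) with hk
  have hmono := List.pairwise_iff_getElem.1 hs
  have hrt : rnk s t ≤ t := rnk_le s t
  have hvr : s.getD (rnk s t) 0 = s.getD t 0 := rnk_val s t
  have h1 : rnk s t < s.length := Nat.lt_of_le_of_lt hrt ht
  by_contra hne
  rcases Nat.lt_or_ge (rnk s t) k with hlt1 | hge1
  · have h5 := hlt (rnk s t) h1 hlt1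
    rw [← List.getD_eq_getElem s 0 h1, hvr] at h5
    exact lt_irrefl _ h5
  · have hklt : k < rnk s t := lt_of_le_of_ne hge1 fun h => hne h.symm
    have h0 : rnk s t ≠ 0 := by omega
    have hm : rnk s t - 1 < s.length := by omega
    have h2 := hge (rnk s t - 1) hm (by omega)
    have h3 : s[rnk s t - 1] ≤ s[t] := by
      rcases eq_or_lt_of_le (show rnk s t - 1 ≤ t by omega) with h | h
      · simp [h]
      · exact hmono _ _ hm ht h
    have h4 : s[rnk s t - 1] = s.getD t 0 := by
      rw [← List.getD_eq_getElem s 0 ht] at h3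
      omega
    exact rnk_pred s t h0 (by rw [List.getD_eq_getElem s 0 hm]; exact h4)

-- the sorted pair list, sorted values, and position map used to read A's loop
def sxOf (p : List Int) : List (Int × Int) :=
  PySem.List.sorted2 (pairE p 0) (fun q => q.1) (fun q => q.2) false

def sOf (p : List Int) : List Int := (sxOf p).map (·.1)

def TOf (p : List Int) (i : Nat) : Nat := ((sxOf p).map (·.2)).idxOf (i : Int)

-- the body of A's second loop, with x fixed to the sorted pair list
def stepF (p : List Int) : List Int → Int → List Int := fun loc tn =>
  if (PySem.List.pyGetD (sxOf p) tn ((0:Int), (0:Int))).1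
       = (PySem.List.pyGetD (sxOf p) (tn - 1) ((0:Int), (0:Int))).1 then
    pySetItem loc (PySem.List.pyGetD (sxOf p) tn ((0:Int), (0:Int))).2
      (PySem.List.pyGetD loc (PySem.List.pyGetD (sxOf p) (tn - 1) ((0:Int), (0:Int))).2 0)
  else
    pySetItem loc (PySem.List.pyGetD (sxOf p) tn ((0:Int), (0:Int))).2 tn

def invP (p : List Int) (k : Nat) (loc : List Int) : Prop :=
  loc.length = p.length ∧ ∀ i : Nat, i < p.length →
    loc.getD i 0 = if TOf p i < k then ((rnk (sOf p) (TOf p i) : Nat) : Int) else 0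

lemma sx_perm (p : List Int) : (sxOf p).Perm (pairE p 0) :=
  PySem.List.sorted2_perm _ _ _ _

lemma sx_length (p : List Int) : (sxOf p).length = p.length :=
  (sx_perm p).length_eq.trans (length_pairE p 0)

lemma sxs_perm (p : List Int) :
    ((sxOf p).map (·.2)).Perm (PySem.List.pyRange 0 (p.length : Int) 1) := by
  have h := (sx_perm p).map (·.2)
  rw [map_snd_pairE] at h
  simpa using h

lemma sxs_nodup (p : List Int) : ((sxOf p).map (·.2)).Nodup :=
  ((sxs_perm p).nodup_iff).2 (PySem.List.nodup_pyRange_one _ _)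

lemma mem_sxs (p : List Int) (i : Nat) (hi : i < p.length) :
    (i : Int) ∈ (sxOf p).map (·.2) := by
  rw [(sxs_perm p).mem_iff, PySem.List.mem_pyRange_one]
  omega

lemma sx_mem_char (p : List Int) (q : Int × Int) (hq : q ∈ sxOf p) :
    ∃ m : Nat, m < p.length ∧ q = (p.getD m 0, (m : Int)) := by
  obtain ⟨k, hk, hkp⟩ := mem_pairE p 0 q ((sx_perm p).subset hq)
  exact ⟨k, hk, by simpa using hkp⟩

lemma s_pairwise (p : List Int) : (sOf p).Pairwise (· ≤ ·) := by
  refine List.Pairwise.map _ ?_ (sorted2_pairwise (pairE p 0))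
  intro a b h
  simp [pLt] at h
  omega

lemma s_length (p : List Int) : (sOf p).length = p.length := by
  simp [sOf, sx_length]

lemma s_eq_sorted (p : List Int) : PySem.List.sorted p (fun v => v) false = sOf p := by
  apply PySem.List.sorted_id_eq_of_perm_of_pairwise
  · have h := (sx_perm p).map (·.1)
    rw [map_fst_pairE] at h
    exact h
  · exact s_pairwise p

lemma T_lt (p : List Int) (i : Nat) (hi : i < p.length) : TOf p i < p.length := by
  have h := List.idxOf_lt_length_of_mem (mem_sxs p i hi)
  simpa [TOf, sx_length p] using h

lemma sxs_getElem_T (p : List Int) (i : Nat) (hi : i < p.length) :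
    ((sxOf p).map (·.2))[TOf p i]'(List.idxOf_lt_length_of_mem (mem_sxs p i hi)) = (i : Int) :=
  List.getElem_idxOf (List.idxOf_lt_length_of_mem (mem_sxs p i hi))

lemma T_of_getElem (p : List Int) (k : Nat) (hk : k < (sxOf p).length) (m : Nat)
    (hsnd : ((sxOf p)[k]).2 = (m : Int)) : TOf p m = k := by
  have hk' : k < ((sxOf p).map (·.2)).length := by simpa using hk
  have h := (sxs_nodup p).idxOf_getElem k hk'
  rw [List.getElem_map] at h
  rw [hsnd] at h
  exact h

lemma step_inv (p : List Int) (k : Nat) (loc : List Int)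
    (h : invP p k loc) (h1 : 1 ≤ k) (h2 : k < p.length) :
    invP p (k + 1) (stepF p loc (k : Int)) := by
  obtain ⟨hlen, hval⟩ := h
  have hkx : k < (sxOf p).length := by rw [sx_length]; exact h2
  have hk1x : k - 1 < (sxOf p).length := by omega
  obtain ⟨m, hm, hq⟩ := sx_mem_char p _ (List.getElem_mem hkx)
  obtain ⟨m', hm', hq'⟩ := sx_mem_char p _ (List.getElem_mem hk1x)
  have e1 : PySem.List.pyGetD (sxOf p) (k : Int) ((0:Int), (0:Int)) = (sxOf p)[k] := by
    rw [PySem.List.pyGetD_natCast, List.getD_eq_getElem _ _ hkx]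
  have e2 : PySem.List.pyGetD (sxOf p) ((k : Int) - 1) ((0:Int), (0:Int)) = (sxOf p)[k-1] := by
    rw [show (k : Int) - 1 = ((k - 1 : Nat) : Int) by omega, PySem.List.pyGetD_natCast,
        List.getD_eq_getElem _ _ hk1x]
  have hTm : TOf p m = k := T_of_getElem p k hkx m (by rw [hq])
  have hTm' : TOf p m' = k - 1 := T_of_getElem p (k-1) hk1x m' (by rw [hq'])
  have hsgk : (sOf p).getD k 0 = p.getD m 0 := by
    rw [List.getD_eq_getElem _ _ (by rw [s_length]; exact h2)]
    simp only [sOf, List.getElem_map]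
    rw [hq]
  have hsgk1 : (sOf p).getD (k-1) 0 = p.getD m' 0 := by
    rw [List.getD_eq_getElem _ _ (by rw [s_length]; omega)]
    simp only [sOf, List.getElem_map]
    rw [hq']
  have hrnk_k : rnk (sOf p) k = if p.getD m 0 = p.getD m' 0 then rnk (sOf p) (k-1) else k := by
    conv_lhs => rw [show k = (k-1) + 1 by omega]
    show (if (sOf p).getD ((k-1)+1) 0 = (sOf p).getD (k-1) 0 then rnk (sOf p) (k-1) else (k-1)+1)
        = _
    rw [show (k-1) + 1 = k by omega, hsgk, hsgk1]
  have hread : PySem.List.pyGetD loc ((sxOf p)[k-1]).2 0 = ((rnk (sOf p) (k-1) : Nat) : Int) := by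
    rw [hq']
    rw [PySem.List.pyGetD_natCast]
    rw [hval m' hm']
    rw [if_pos (by omega : TOf p m' < k), hTm']
  have hset : stepF p loc (k : Int)
      = loc.set m ((rnk (sOf p) k : Nat) : Int) := by
    simp only [stepF, e1, e2, hread]
    by_cases hc : ((sxOf p)[k]).1 = ((sxOf p)[k-1]).1
    · rw [if_pos hc]
      have hc' : p.getD m 0 = p.getD m' 0 := by
        rw [hq] at hc; rw [hq'] at hc; exact hc
      rw [hrnk_k, if_pos hc']
      simp only [pySetItem]
      rw [hq]
      simp
    · rw [if_neg hc]
      have hc' : ¬ (p.getD m 0 = p.getD m' 0) := by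
        rw [hq] at hc; rw [hq'] at hc; exact hc
      rw [hrnk_k, if_neg hc']
      simp only [pySetItem]
      rw [hq]
      simp [Int.toNat_natCast]
  rw [hset]
  constructor
  · simp [hlen]
  · intro i hi
    by_cases hii : i = m
    · subst hii
      rw [List.getD_eq_getElem _ _ (by simp [hlen, hm])]
      rw [List.getElem_set_self (by simp [hlen, hm])]
      rw [if_pos (by omega : TOf p i < k + 1)]
      rw [hTm]
    · rw [List.getD_eq_getElem _ _ (by simp [hlen]; exact hi)]
      rw [List.getElem_set_ne (fun h => hii h.symm)]
      rw [← List.getD_eq_getElem _ (0:Int) (by rw [hlen]; exact hi)]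
      rw [hval i hi]
      have hTne : TOf p i ≠ k := by
        intro hT
        apply hii
        have h2' : ((sxOf p).map (·.2))[k]'(by simpa using hkx) = (m : Int) := by
          rw [List.getElem_map]; rw [hq]
        subst hT
        have h1' := sxs_getElem_T p i hi
        have h3' : (i : Int) = (m : Int) := h1'.symm.trans h2'
        exact_mod_cast h3'
      by_cases hlt : TOf p i < k
      · rw [if_pos hlt, if_pos (by omega)]
      · rw [if_neg hlt, if_neg (by omega)]

lemma loop_inv (p : List Int) (k : Nat) (h1 : 1 ≤ k) (h2 : k ≤ p.length) :
    invP p k ((PySem.List.pyRange 1 (k : Int) 1).foldl (stepF p) (List.replicate p.length 0)) := by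
  induction k with
  | zero => omega
  | succ k ih =>
      rcases Nat.lt_or_ge k 1 with h | h
      · have hk0 : k = 0 := by omega
        subst hk0
        rw [show ((0 + 1 : Nat) : Int) = 1 by norm_num]
        rw [PySem.List.pyRange_one_eq_nil (le_refl 1)]
        rw [List.foldl_nil]
        refine ⟨by simp, ?_⟩
        intro i hi
        rw [List.getD_eq_getElem _ _ (by simp [hi])]
        rw [List.getElem_replicate]
        by_cases hT : TOf p i < 1
        · rw [if_pos hT]
          rw [show TOf p i = 0 by omega]
          simp [rnk]
        · rw [if_neg hT]
      · have hklt : k < p.length := by omega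
        have hr : PySem.List.pyRange 1 ((k + 1 : Nat) : Int) 1
            = PySem.List.pyRange 1 (k : Int) 1 ++ [(k : Int)] := by
          rw [show ((k + 1 : Nat) : Int) = (k : Int) + 1 by push_cast; ring]
          exact PySem.List.pyRange_one_succ_right (by omega)
        rw [hr, List.foldl_append, List.foldl_cons, List.foldl_nil]
        exact step_inv p k _ (ih h (by omega)) h hklt

lemma A_eval (p : List Int) :
    convert_locations p
      = (PySem.List.pyRange 1 (p.length : Int) 1).foldl (stepF p) (List.replicate p.length 0) := by
  simp only [convert_locations, PySem.List.len_eq, Int.toNat_natCast]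
  rw [foldl_build]
  simp only [List.nil_append]
  rfl

theorem convert_locations_spec : Claim_equal_convert_locations := by
  unfold Claim_equal_convert_locations
  intro p _
  unfold Spec_convert_locations
  show convert_locations p = convert_locations_alt p
  have hBlen : (convert_locations_alt p).length = p.length := by
    simp [convert_locations_alt]
  rcases Nat.eq_zero_or_pos p.length with h0 | hpos
  · have hp : p = [] := List.eq_nil_of_length_eq_zero h0
    subst hp
    rfl
  · obtain ⟨hAlen, hAval⟩ := loop_inv p p.length hpos (le_refl _)
    rw [A_eval p]
    apply List.ext_getElem (by rw [hAlen, hBlen])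
    intro i h_i h_i2
    have hi : i < p.length := by rwa [hAlen] at h_i
    have hL : ((PySem.List.pyRange 1 (p.length : Int) 1).foldl (stepF p)
        (List.replicate p.length 0))[i] = ((rnk (sOf p) (TOf p i) : Nat) : Int) := by
      have h := hAval i hi
      rw [List.getD_eq_getElem _ _ h_i] at h
      rw [h, if_pos (T_lt p i hi)]
    have hR : (convert_locations_alt p)[i]
        = ((PySem.List.bisectLeft (sOf p) (p[i]'hi) : Nat) : Int) := by
      simp only [convert_locations_alt, s_eq_sorted]
      simp
    rw [hL, hR]
    congr 2
    have hTl : TOf p i < (sOf p).length := by rw [s_length]; exact T_lt p i hi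
    rw [rnk_eq_bisect (sOf p) (s_pairwise p) _ hTl]
    congr 1
    have hTlt' : TOf p i < ((sxOf p).map (·.2)).length :=
      List.idxOf_lt_length_of_mem (mem_sxs p i hi)
    have hTx : TOf p i < (sxOf p).length := by simpa using hTlt'
    obtain ⟨m, hm, hq⟩ := sx_mem_char p ((sxOf p)[TOf p i]'hTx) (List.getElem_mem hTx)
    have hsnd : ((sxOf p)[TOf p i]'hTx).2 = (i : Int) := by
      have h := sxs_getElem_T p i hi
      rw [List.getElem_map] at h
      exact h
    have hmi : m = i := by
      rw [hq] at hsnd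
      simp at hsnd
      exact_mod_cast hsnd
    rw [List.getD_eq_getElem _ _ hTl]
    simp only [sOf, List.getElem_map]
    rw [hq, hmi]
    simp [List.getElem?_eq_getElem hi]
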